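-- pv_equiv track=rewrite | github.com/NeoBitose/Codingan_kuliah | Sem_2/sem2_modul5_devide-conquer/2.1.py | selisihLinear
-- ===== SOURCE A (Python) =====
-- def selisihLinear(listdata):
--
--     n = len(listdata)
--     hasil_selisih = 0
--     nilai_a = 0
--     nilai_b = 0
--
--     for a in range(n-1):
--         selisih_tmp = abs(listdata[a] - listdata[a+1])
--         if selisih_tmp > hasil_selisih:
--             hasil_selisih = selisih_tmp
--             nilai_a = listdata[a]
--             nilai_b = listdata[a+1]
--
--     return hasil_selisih, nilai_a, nilai_b
-- ===== SOURCE B (Python) =====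
-- def selisihLinear(listdata):
--     # reduce-then-locate: compute the max adjacent |difference| first, then find its first pair
--     pairs = list(zip(listdata, listdata[1:]))
--     best = max((abs(x - y) for x, y in pairs), default=0)
--     if best == 0:
--         return 0, 0, 0
--     x, y = next(p for p in pairs if abs(p[0] - p[1]) == best)
--     return best, x, y
-- ===== Notes on version B (the rewrite author's own statement) =====
-- stated objective: alternative
-- what changed: Replaces the single fused best-so-far tracking loop over indices with a reduce-then-locate decomposition: build the adjacent pairs with zip, take max of the absolute differences (default 0), and if it is positive locate the first pair attaining it.
import Mathlib
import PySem

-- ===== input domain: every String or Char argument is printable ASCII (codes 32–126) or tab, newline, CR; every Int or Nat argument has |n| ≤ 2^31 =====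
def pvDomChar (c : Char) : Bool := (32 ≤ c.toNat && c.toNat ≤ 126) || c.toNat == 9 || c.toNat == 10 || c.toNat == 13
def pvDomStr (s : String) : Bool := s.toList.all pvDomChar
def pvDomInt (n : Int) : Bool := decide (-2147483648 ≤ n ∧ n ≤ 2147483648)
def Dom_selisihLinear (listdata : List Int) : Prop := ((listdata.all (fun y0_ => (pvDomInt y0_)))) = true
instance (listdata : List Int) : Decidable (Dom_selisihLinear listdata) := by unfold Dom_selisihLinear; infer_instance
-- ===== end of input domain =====

-- B replaces A's fused best-so-far tracking loop by a reduce-then-locate decomposition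
-- (max over adjacent |differences|, then first pair attaining it); alternative, same cost.

-- ===== PORT A =====
def selisihLinear (listdata : List Int) : Int × Int × Int :=
  let n : Int := listdata.length
  (PySem.List.pyRange 0 (n - 1) 1).foldl
    (fun st a =>
      let selisih_tmp := |PySem.List.pyGetD listdata a 0 - PySem.List.pyGetD listdata (a + 1) 0|
      if selisih_tmp > st.1 then
        (selisih_tmp, PySem.List.pyGetD listdata a 0, PySem.List.pyGetD listdata (a + 1) 0)
      else st)
    (0, 0, 0)

-- ===== PORT B =====
def selisihLinear_alt (listdata : List Int) : Int × Int × Int :=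
  let pairs := listdata.zip (PySem.List.slice listdata (some 1) none)
  let best := PySem.List.maxD (pairs.map (fun p => |p.1 - p.2|)) (fun y => y) 0
  if best = 0 then (0, 0, 0)
  else
    -- 'next(...)' in Source B always finds a pair when best > 0; the .getD default is unreachable
    let p := (pairs.find? (fun q => |q.1 - q.2| == best)).getD (0, 0)
    (best, p.1, p.2)

-- ===== PRECONDITION & SPEC =====
def Spec_selisihLinear (listdata : List Int) (out : Int × Int × Int) : Prop := out = selisihLinear_alt listdata
instance (listdata : List Int) (out : Int × Int × Int) : Decidable (Spec_selisihLinear listdata out) := by unfold Spec_selisihLinear; infer_instance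

-- ===== CLAIM (what is proved, stated in full; the proofs are below) =====
def Claim_equal_selisihLinear : Prop := ∀ (listdata : List Int), Dom_selisihLinear listdata → Spec_selisihLinear listdata (selisihLinear listdata)

-- ===== LEMMAS AND PROOFS =====

/-- absolute difference of an adjacent pair -/
def pvD (p : Int × Int) : Int := |p.1 - p.2|

/-- A's loop body on a pair -/
def pvStep (st : Int × Int × Int) (p : Int × Int) : Int × Int × Int :=
  if pvD p > st.1 then (pvD p, p.1, p.2) else st

/-- maximum adjacent |difference|, default 0 -/
def pvM (ps : List (Int × Int)) : Int := (ps.map pvD).foldl max 0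

lemma pv_foldl_max_shift (l : List Int) : ∀ a b : Int,
    l.foldl max (max a b) = max a (l.foldl max b) := by
  induction l with
  | nil => intro a b; rfl
  | cons c t ih =>
    intro a b
    simp only [List.foldl_cons]
    rw [max_assoc, ih]

lemma pvM_nil : pvM [] = 0 := rfl

lemma pvM_cons (p : Int × Int) (r : List (Int × Int)) :
    pvM (p :: r) = max (pvD p) (pvM r) := by
  simp only [pvM, List.map_cons, List.foldl_cons]
  rw [max_comm, pv_foldl_max_shift]

lemma pvM_nonneg (ps : List (Int × Int)) : 0 ≤ pvM ps :=
  (PySem.List.le_foldl_max (ps.map pvD) 0).1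

lemma pvD_nonneg (p : Int × Int) : 0 ≤ pvD p := abs_nonneg _

/-- the tracking loop = reduce-then-locate -/
lemma pvTrack (ps : List (Int × Int)) : ∀ s : Int × Int × Int, 0 ≤ s.1 →
    ps.foldl pvStep s =
      if pvM ps ≤ s.1 then s
      else (pvM ps, ((ps.find? (fun q => pvD q == pvM ps)).getD (0, 0)).1,
                    ((ps.find? (fun q => pvD q == pvM ps)).getD (0, 0)).2) := by
  induction ps with
  | nil =>
    intro s hs
    simp [pvM_nil, hs]
  | cons p r ih =>
    intro s hs
    simp only [List.foldl_cons, pvM_cons]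
    by_cases h : pvD p > s.1
    · rw [pvStep, if_pos h, ih (pvD p, p.1, p.2) (pvD_nonneg p)]
      have hmax : ¬ (max (pvD p) (pvM r) ≤ s.1) := by
        simp only [max_le_iff, not_and_or]; left; omega
      rw [if_neg hmax]
      by_cases h2 : pvM r ≤ pvD p
      · rw [if_pos h2]
        have hM : max (pvD p) (pvM r) = pvD p := max_eq_left h2
        rw [hM]
        have hfind : (p :: r).find? (fun q => pvD q == pvD p) = some p := by
          simp
        rw [hfind]
        rfl
      · rw [if_neg h2]
        have hM : max (pvD p) (pvM r) = pvM r := max_eq_right (by omega)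
        rw [hM]
        have hfind : (p :: r).find? (fun q => pvD q == pvM r) =
            r.find? (fun q => pvD q == pvM r) := by
          rw [List.find?_cons_of_neg]
          simp only [beq_iff_eq]
          omega
        rw [hfind]
    · rw [pvStep, if_neg h, ih s hs]
      by_cases h2 : pvM r ≤ s.1
      · rw [if_pos h2, if_pos (by omega)]
      · rw [if_neg h2]
        have hmax : ¬ (max (pvD p) (pvM r) ≤ s.1) := by
          simp only [max_le_iff, not_and_or]; right; omega
        rw [if_neg hmax]
        have hM : max (pvD p) (pvM r) = pvM r := max_eq_right (by omega)
        rw [hM]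
        have hfind : (p :: r).find? (fun q => pvD q == pvM r) =
            r.find? (fun q => pvD q == pvM r) := by
          rw [List.find?_cons_of_neg]
          simp only [beq_iff_eq]
          omega
        rw [hfind]

/-- A's index loop, generalized initial state, rewritten as a fold over the adjacent pairs -/
lemma pvRangeFold : ∀ (xs : List Int) (s : Int × Int × Int),
    (PySem.List.pyRange 0 ((xs.length : Int) - 1) 1).foldl
      (fun st a => pvStep st (PySem.List.pyGetD xs a 0, PySem.List.pyGetD xs (a + 1) 0)) s
    = (xs.zip xs.tail).foldl pvStep s := by
  intro xs
  induction xs with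
  | nil =>
    intro s
    rw [PySem.List.pyRange_one_eq_nil (by simp)]
    rfl
  | cons x rest ih =>
    intro s
    cases rest with
    | nil =>
      rw [PySem.List.pyRange_one_eq_nil (by simp)]
      rfl
    | cons y t =>
      have hlen : ((x :: y :: t).length : Int) - 1 = (t.length : Int) + 1 := by
        simp
      rw [hlen, PySem.List.pyRange_one_cons (by positivity)]
      simp only [List.foldl_cons]
      have h0 : PySem.List.pyGetD (x :: y :: t) 0 0 = x := by
        simp
      have h1 : PySem.List.pyGetD (x :: y :: t) (0 + 1) 0 = y := by
        simpa using PySem.List.pyGetD_natCast (x :: y :: t) 1 0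

      rw [h0, h1]
      have hzip : (x :: y :: t).zip (x :: y :: t).tail = (x, y) :: (y :: t).zip ((y :: t).tail) := by
        simp [List.zip]
      rw [hzip]
      simp only [List.foldl_cons]
      set s' := pvStep s (x, y) with hs'
      -- shift the range by one and apply the IH for (y :: t)
      have h01 : (0 : Int) + 1 = 1 := by norm_num
      have hshift :
          (PySem.List.pyRange (0 + 1) ((t.length : Int) + 1) 1).foldl
            (fun st a => pvStep st (PySem.List.pyGetD (x :: y :: t) a 0,
                                    PySem.List.pyGetD (x :: y :: t) (a + 1) 0)) s'
          = (PySem.List.pyRange 0 ((y :: t).length - 1) 1).foldl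
            (fun st a => pvStep st (PySem.List.pyGetD (y :: t) a 0,
                                    PySem.List.pyGetD (y :: t) (a + 1) 0)) s' := by
        have e1 : PySem.List.pyRange ((0 : Int) + 1) ((t.length : Int) + 1) 1
            = (List.range t.length).map (fun k : Nat => (0 : Int) + 1 + k) := by
          rw [PySem.List.pyRange_one]
          have ht : (((t.length : Int) + 1) - ((0 : Int) + 1)).toNat = t.length := by omega
          rw [ht]
        have e2 : PySem.List.pyRange 0 (((y :: t).length : Int) - 1) 1
            = (List.range t.length).map (fun k : Nat => (0 : Int) + k) := by
          rw [PySem.List.pyRange_one]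
          have ht : ((((y :: t).length : Int) - 1) - (0 : Int)).toNat = t.length := by
            simp only [List.length_cons]; omega
          rw [ht]
        rw [e1, e2, List.foldl_map, List.foldl_map]
        apply PySem.List.foldl_congr_mem
        intro acc k _
        have c1 : (0 : Int) + 1 + (k : Int) = ((k + 1 : Nat) : Int) := by push_cast; ring
        have c2 : (0 : Int) + 1 + (k : Int) + 1 = ((k + 2 : Nat) : Int) := by push_cast; ring
        have c3 : (0 : Int) + (k : Int) = ((k : Nat) : Int) := by omega
        have c4 : (0 : Int) + (k : Int) + 1 = ((k + 1 : Nat) : Int) := by push_cast; ring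
        rw [c2, c1, c4, c3, PySem.List.pyGetD_natCast, PySem.List.pyGetD_natCast,
            PySem.List.pyGetD_natCast, PySem.List.pyGetD_natCast]
        rfl
      rw [hshift, ih s']

/-- maxD over the mapped |differences| with default 0 is pvM -/
lemma pvBest_eq (ps : List (Int × Int)) :
    PySem.List.maxD (ps.map (fun p => |p.1 - p.2|)) (fun y => y) 0 = pvM ps := by
  cases ps with
  | nil => rfl
  | cons p r =>
    show PySem.List.maxD (pvD p :: r.map pvD) (fun y => y) 0 = pvM (p :: r)
    have h : PySem.List.maxD (pvD p :: r.map pvD) (fun y => y) 0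
        = (r.map pvD).foldl max (pvD p) := by
      simp [PySem.List.maxD, PySem.List.max?_id_cons]
    rw [h, pvM_cons]
    show List.foldl max (pvD p) (r.map pvD) = max (pvD p) ((r.map pvD).foldl max 0)
    rw [← pv_foldl_max_shift, max_eq_left (pvD_nonneg p)]

-- ===== VERDICT (by name: the statement is the Claim_ definition above) =====
theorem selisihLinear_spec : Claim_equal_selisihLinear := by
  intro listdata _
  unfold Spec_selisihLinear selisihLinear selisihLinear_alt
  rw [PySem.List.slice_from_one]
  have hA := pvRangeFold listdata (0, 0, 0)
  have hbody :
      (fun (st : Int × Int × Int) (a : Int) =>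
        let selisih_tmp := |PySem.List.pyGetD listdata a 0 - PySem.List.pyGetD listdata (a + 1) 0|
        if selisih_tmp > st.1 then
          (selisih_tmp, PySem.List.pyGetD listdata a 0, PySem.List.pyGetD listdata (a + 1) 0)
        else st)
      = (fun st a => pvStep st (PySem.List.pyGetD listdata a 0, PySem.List.pyGetD listdata (a + 1) 0)) := rfl
  simp only [hbody]
  rw [hA, pvTrack _ (0, 0, 0) le_rfl, pvBest_eq]
  have hnn := pvM_nonneg (listdata.zip listdata.tail)
  by_cases h0 : pvM (listdata.zip listdata.tail) = 0
  · rw [if_pos (by omega), if_pos h0]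
  · rw [if_neg (by omega), if_neg h0]
    rfl
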